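-- pv_equiv track=rewrite | github.com/FeijiangHan/MFVP | back-end algorithm and model/s_util.py | is_connection
-- ===== SOURCE A (Python) =====
-- def is_connection(edge, now_connection_subgraph):
--     if not now_connection_subgraph:
--         return True
--
--     is_connection_subgraph = False
--     for edge2 in now_connection_subgraph:
--         if set(edge.split('|')) & set(edge2.split('|')):
--             is_connection_subgraph = True
--             break
--     return is_connection_subgraph
-- ===== SOURCE B (Python) =====
-- def is_connection(edge, now_connection_subgraph):
--     if not now_connection_subgraph:
--         return True
--     all_nodes = set()
--     for edge2 in now_connection_subgraph:
--         all_nodes.update(edge2.split('|'))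
--     return bool(set(edge.split('|')) & all_nodes)
-- ===== Notes on version B (the rewrite author's own statement) =====
-- stated objective: faster
-- what changed: B replaces the per-edge intersect-and-break scan with building one aggregate set of all subgraph node names and doing a single intersection test against it (empty-subgraph guard kept).
import Mathlib
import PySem

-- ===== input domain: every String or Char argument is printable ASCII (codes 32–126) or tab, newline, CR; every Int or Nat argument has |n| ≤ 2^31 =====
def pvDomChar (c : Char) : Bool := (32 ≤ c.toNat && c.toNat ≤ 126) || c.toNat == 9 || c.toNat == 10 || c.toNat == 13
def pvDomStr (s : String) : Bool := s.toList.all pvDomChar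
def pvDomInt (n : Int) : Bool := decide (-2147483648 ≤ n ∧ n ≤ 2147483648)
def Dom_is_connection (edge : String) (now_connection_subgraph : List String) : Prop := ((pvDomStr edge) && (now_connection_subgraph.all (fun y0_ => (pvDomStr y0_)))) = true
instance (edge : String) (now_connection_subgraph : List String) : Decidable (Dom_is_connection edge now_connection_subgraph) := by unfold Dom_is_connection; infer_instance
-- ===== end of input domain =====

-- B builds one aggregate set of all subgraph node names and does a single intersection test,
-- instead of A's per-edge intersect-with-break scan (alternative decomposition, same cost).

-- s.split('|'): PySem.Chars.splitOn on the character lists ('|' is a fixed nonempty separator,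
-- so Python's split never raises); exact on the domain.
def splitPipe (s : String) : List String :=
  (PySem.Chars.splitOn s.toList ['|']).map String.ofList

-- ===== PORT A =====
-- the for-loop with break: true at the first edge2 sharing a node, else false
def isConnLoop (edge : String) : List String → Bool
  | [] => false
  | edge2 :: rest =>
    if !(PySem.Set.inter (PySem.Set.ofList (splitPipe edge))
                         (PySem.Set.ofList (splitPipe edge2))).isEmpty
    then true
    else isConnLoop edge rest

def is_connection (edge : String) (now_connection_subgraph : List String) : Bool :=
  if now_connection_subgraph.isEmpty then true
  else isConnLoop edge now_connection_subgraph

-- ===== PORT B =====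
def is_connection_alt (edge : String) (now_connection_subgraph : List String) : Bool :=
  if now_connection_subgraph.isEmpty then true
  else
    let allNodes := now_connection_subgraph.foldl
      (fun s edge2 => PySem.Set.update s (splitPipe edge2)) PySem.Set.empty
    !(PySem.Set.inter (PySem.Set.ofList (splitPipe edge)) allNodes).isEmpty

-- ===== PRECONDITION & SPEC =====
def Spec_is_connection (edge : String) (now_connection_subgraph : List String) (out : Bool) : Prop := out = is_connection_alt edge now_connection_subgraph
instance (edge : String) (now_connection_subgraph : List String) (out : Bool) : Decidable (Spec_is_connection edge now_connection_subgraph out) := by unfold Spec_is_connection; infer_instance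

-- ===== CLAIM (what is proved, stated in full; the proofs are below) =====
def Claim_equal_is_connection : Prop := ∀ (edge : String) (now_connection_subgraph : List String), Dom_is_connection edge now_connection_subgraph → Spec_is_connection edge now_connection_subgraph (is_connection edge now_connection_subgraph)

-- ===== LEMMAS AND PROOFS =====

-- Python truthiness of `set(edge) & set(e2)`: the two node sets share an element
theorem interPipe_iff (a b : String) :
    (!(PySem.Set.inter (PySem.Set.ofList (splitPipe a))
        (PySem.Set.ofList (splitPipe b))).isEmpty) = true ↔
      ∃ x, x ∈ splitPipe a ∧ x ∈ splitPipe b := by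
  rw [Bool.not_eq_eq_eq_not, Bool.not_true, List.isEmpty_eq_false_iff_exists_mem]
  constructor
  · rintro ⟨x, hx⟩
    rw [PySem.Set.mem_inter, PySem.Set.mem_ofList, PySem.Set.mem_ofList] at hx
    exact ⟨x, hx⟩
  · rintro ⟨x, hx1, hx2⟩
    exact ⟨x, by rw [PySem.Set.mem_inter, PySem.Set.mem_ofList, PySem.Set.mem_ofList];
                 exact ⟨hx1, hx2⟩⟩

-- characterisation of A's loop
theorem isConnLoop_iff (edge : String) (es : List String) :
    isConnLoop edge es = true ↔ ∃ e2 ∈ es, ∃ x, x ∈ splitPipe edge ∧ x ∈ splitPipe e2 := by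
  induction es with
  | nil => simp [isConnLoop]
  | cons e2 rest ih =>
    simp only [isConnLoop]
    by_cases h : (!(PySem.Set.inter (PySem.Set.ofList (splitPipe edge))
        (PySem.Set.ofList (splitPipe e2))).isEmpty) = true
    · rw [if_pos h]
      obtain ⟨x, hx⟩ := (interPipe_iff edge e2).mp h
      simp only [List.mem_cons, true_iff]
      exact ⟨e2, Or.inl rfl, x, hx⟩
    · rw [if_neg h, ih]
      have hno := fun hx => h ((interPipe_iff edge e2).mpr hx)
      constructor
      · rintro ⟨e3, he3, hx⟩; exact ⟨e3, List.mem_cons_of_mem _ he3, hx⟩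
      · rintro ⟨e3, he3, hx⟩
        rcases List.mem_cons.mp he3 with rfl | he3
        · exact absurd hx hno
        · exact ⟨e3, he3, hx⟩

-- characterisation of B's aggregate node set
theorem nodes_mem (es : List String) (s : PySem.Set String) (x : String) :
    (x ∈ es.foldl (fun s e2 => PySem.Set.update s (splitPipe e2)) s) ↔
      x ∈ s ∨ ∃ e2 ∈ es, x ∈ splitPipe e2 := by
  induction es generalizing s with
  | nil => simp
  | cons e2 rest ih =>
    simp only [List.foldl_cons, ih, PySem.Set.mem_update, List.mem_cons]
    constructor
    · rintro ((h | h) | ⟨e3, he3, hx⟩)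
      · exact Or.inl h
      · exact Or.inr ⟨e2, Or.inl rfl, h⟩
      · exact Or.inr ⟨e3, Or.inr he3, hx⟩
    · rintro (h | ⟨e3, rfl | he3, hx⟩)
      · exact Or.inl (Or.inl h)
      · exact Or.inl (Or.inr hx)
      · exact Or.inr ⟨e3, he3, hx⟩

-- ===== VERDICT (by name: the statement is the Claim_ definition above) =====
theorem is_connection_spec : Claim_equal_is_connection := by
  intro edge sub _
  unfold Spec_is_connection is_connection is_connection_alt
  by_cases hs : sub.isEmpty
  · simp [hs]
  · simp only [hs, Bool.false_eq_true, if_false]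
    rw [Bool.eq_iff_iff, isConnLoop_iff]
    rw [Bool.not_eq_eq_eq_not, Bool.not_true, List.isEmpty_eq_false_iff_exists_mem]
    constructor
    · rintro ⟨e2, he2, x, hx1, hx2⟩
      refine ⟨x, ?_⟩
      rw [PySem.Set.mem_inter, PySem.Set.mem_ofList, nodes_mem]
      exact ⟨hx1, Or.inr ⟨e2, he2, hx2⟩⟩
    · rintro ⟨x, hx⟩
      rw [PySem.Set.mem_inter, PySem.Set.mem_ofList, nodes_mem] at hx
      rcases hx with ⟨hx1, h | ⟨e2, he2, hx2⟩⟩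
      · exact absurd h (List.not_mem_nil)
      · exact ⟨e2, he2, x, hx1, hx2⟩
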